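-- pv_equiv track=rewrite | github.com/vusec/DMARacer | scripts/reports/db/inspect.py | get_bt_printed_lines_diff
-- ===== SOURCE A (Python) =====
-- def get_bt_printed_lines_diff(tl, pl):
--     this_lines = list(reversed(tl))
--     prev_lines = list(reversed(pl))
--     del_count = 0
--     for i,prev_line in enumerate(prev_lines):
--         if i < len(this_lines) + del_count and prev_line == this_lines[i-del_count]:
--             del this_lines[i-del_count]
--             del_count += 1
--         else: break
--     if del_count > 0: this_lines = [' ... (same as previous backtrace) ...'] + this_lines
--     this_lines.reverse()
--     return this_lines
-- ===== SOURCE B (Python) =====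
-- def get_bt_printed_lines_diff(tl, pl):
--     k = 0
--     while k < len(tl) and k < len(pl) and tl[len(tl) - 1 - k] == pl[len(pl) - 1 - k]:
--         k += 1
--     if k == 0:
--         return list(tl)
--     return tl[:len(tl) - k] + [' ... (same as previous backtrace) ...']
-- ===== Notes on version B (the rewrite author's own statement) =====
-- stated objective: simpler
-- what changed: Instead of reversing both lists and repeatedly deleting the matching front element of the reversed copy, B counts the common-suffix length by comparing elements from the ends and returns one slice plus the marker.
import Mathlib
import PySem

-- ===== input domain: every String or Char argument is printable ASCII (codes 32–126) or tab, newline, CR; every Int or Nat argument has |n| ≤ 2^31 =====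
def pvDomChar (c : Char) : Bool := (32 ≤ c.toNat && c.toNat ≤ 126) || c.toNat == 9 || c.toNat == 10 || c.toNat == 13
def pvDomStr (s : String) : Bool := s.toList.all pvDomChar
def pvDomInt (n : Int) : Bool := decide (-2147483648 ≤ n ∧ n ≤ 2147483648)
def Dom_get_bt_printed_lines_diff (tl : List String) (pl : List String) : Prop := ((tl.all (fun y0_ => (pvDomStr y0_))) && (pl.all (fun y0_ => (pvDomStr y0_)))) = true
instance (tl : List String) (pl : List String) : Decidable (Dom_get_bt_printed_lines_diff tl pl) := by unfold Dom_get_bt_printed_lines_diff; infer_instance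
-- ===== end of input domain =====

-- B replaces A's reverse-both-then-repeatedly-delete-front loop by counting the common
-- suffix length from the ends and taking one slice (objective: simpler).

-- ===== PORT A =====
-- A's for-loop over prev_lines with the mutable this_lines, del_count and break,
-- carried as explicit state (i is the enumerate index).
def pvALoop (this_lines : List String) (del_count : Int) (i : Nat) :
    List String → List String × Int
  | [] => (this_lines, del_count)
  | prev_line :: rest =>
      if (i : Int) < this_lines.length + del_count then
        match PySem.List.pyGet? this_lines ((i : Int) - del_count) with
        | some v =>
            if prev_line = v then
              match PySem.List.pop? this_lines ((i : Int) - del_count) with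
              | some (_, this') => pvALoop this' (del_count + 1) (i + 1) rest
              | none => (this_lines, del_count)  -- unreachable: index just read
            else (this_lines, del_count)         -- break
        | none => (this_lines, del_count)        -- unreachable (IndexError in Python)
      else (this_lines, del_count)               -- break

def get_bt_printed_lines_diff (tl : List String) (pl : List String) : List String :=
  let this_lines := tl.reverse
  let prev_lines := pl.reverse
  let (this_lines, del_count) := pvALoop this_lines 0 0 prev_lines
  let this_lines :=
    if del_count > 0 then " ... (same as previous backtrace) ..." :: this_lines
    else this_lines
  this_lines.reverse

-- ===== PORT B =====
-- B's while loop: count matching elements from the ends.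
def pvBCount (tl pl : List String) (k : Nat) : Nat :=
  if h : k < tl.length ∧ k < pl.length then
    if tl[tl.length - 1 - k]'(by omega) = pl[pl.length - 1 - k]'(by omega) then
      pvBCount tl pl (k + 1)
    else k
  else k
termination_by tl.length - k

def get_bt_printed_lines_diff_alt (tl : List String) (pl : List String) : List String :=
  let k := pvBCount tl pl 0
  if k = 0 then tl
  else tl.take (tl.length - k) ++ [" ... (same as previous backtrace) ..."]

-- ===== PRECONDITION & SPEC =====
def Spec_get_bt_printed_lines_diff (tl : List String) (pl : List String) (out : List String) : Prop := out = get_bt_printed_lines_diff_alt tl pl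
instance (tl : List String) (pl : List String) (out : List String) : Decidable (Spec_get_bt_printed_lines_diff tl pl out) := by unfold Spec_get_bt_printed_lines_diff; infer_instance

-- ===== CLAIM (what is proved, stated in full; the proofs are below) =====
def Claim_equal_get_bt_printed_lines_diff : Prop := ∀ (tl : List String) (pl : List String), Dom_get_bt_printed_lines_diff tl pl → Spec_get_bt_printed_lines_diff tl pl (get_bt_printed_lines_diff tl pl)

-- ===== LEMMAS AND PROOFS =====

-- common prefix length of two lists
def pvCpl : List String → List String → Nat
  | a :: as, b :: bs => if a = b then pvCpl as bs + 1 else 0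
  | _, _ => 0

theorem pvCpl_nil_right : ∀ (a : List String), pvCpl a [] = 0 := by
  intro a; cases a <;> rfl

theorem pvALoop_eq (P : List String) : ∀ (T : List String) (i : Nat),
    pvALoop T (i : Int) i P = (T.drop (pvCpl T P), (i : Int) + pvCpl T P) := by
  induction P with
  | nil => intro T i; simp [pvALoop, pvCpl_nil_right]
  | cons p rest ih =>
    intro T i
    cases T with
    | nil => simp [pvALoop, pvCpl]
    | cons h t =>
      simp only [pvALoop]
      have hc : (i : Int) < (h :: t).length + i := by simp
      rw [if_pos hc]
      have h0 : (i : Int) - i = 0 := by omega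
      rw [h0]
      have hg : PySem.List.pyGet? (h :: t) 0 = some h := by
        simp [PySem.List.pyGet?, PySem.List.pyIdx?]
      have hp : PySem.List.pop? (h :: t) 0 = some (h, t) := by
        simp [PySem.List.pop?, PySem.List.pyIdx?]
      rw [hg, hp]
      simp only []
      by_cases hpe : p = h
      · rw [if_pos hpe]
        subst hpe
        have h1 := ih t (i + 1)
        rw [show ((i : Int) + 1) = ((i + 1 : Nat) : Int) by push_cast; ring, h1]
        have hcpl : pvCpl (p :: t) (p :: rest) = pvCpl t rest + 1 := by
          simp [pvCpl]
        rw [hcpl, List.drop_succ_cons]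
        refine congrArg₂ Prod.mk rfl ?_
        push_cast; ring
      · rw [if_neg hpe]
        have hcpl : pvCpl (h :: t) (p :: rest) = 0 := by
          simp only [pvCpl]
          rw [if_neg (Ne.symm hpe)]
        rw [hcpl]
        simp

theorem pvBCount_eq (tl pl : List String) : ∀ (k : Nat),
    pvBCount tl pl k = k + pvCpl (tl.reverse.drop k) (pl.reverse.drop k) := by
  have main : ∀ n k, tl.length - k ≤ n →
      pvBCount tl pl k = k + pvCpl (tl.reverse.drop k) (pl.reverse.drop k) := by
    intro n
    induction n with
    | zero =>
      intro k hk
      have hk' : tl.length ≤ k := by omega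
      rw [pvBCount]
      have hno : ¬ (k < tl.length ∧ k < pl.length) := by omega
      rw [dif_neg hno]
      have hnil : tl.reverse.drop k = [] := by
        apply List.drop_eq_nil_of_le; simpa using hk'
      have : pvCpl (tl.reverse.drop k) (pl.reverse.drop k) = 0 := by
        rw [hnil]; cases pl.reverse.drop k <;> rfl
      omega
    | succ n ih =>
      intro k hk
      rw [pvBCount]
      by_cases h : k < tl.length ∧ k < pl.length
      · rw [dif_pos h]
        have htl : tl.reverse.drop k = tl[tl.length - 1 - k]'(by omega) :: tl.reverse.drop (k+1) := by
          rw [List.drop_eq_getElem_cons (by simpa using h.1)]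
          congr 1
          rw [List.getElem_reverse]
        have hpl : pl.reverse.drop k = pl[pl.length - 1 - k]'(by omega) :: pl.reverse.drop (k+1) := by
          rw [List.drop_eq_getElem_cons (by simpa using h.2)]
          congr 1
          rw [List.getElem_reverse]
        by_cases he : tl[tl.length - 1 - k]'(by omega) = pl[pl.length - 1 - k]'(by omega)
        · rw [if_pos he, ih (k+1) (by omega), htl, hpl]
          simp only [pvCpl, if_pos he]
          omega
        · rw [if_neg he, htl, hpl]
          simp only [pvCpl, if_neg he]
          omega
      · rw [dif_neg h]
        rcases (not_and_or.mp h) with h1 | h1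
        · have hnil : tl.reverse.drop k = [] := by
            apply List.drop_eq_nil_of_le; simp; omega
          have : pvCpl (tl.reverse.drop k) (pl.reverse.drop k) = 0 := by
            rw [hnil]; cases pl.reverse.drop k <;> rfl
          omega
        · have hnil : pl.reverse.drop k = [] := by
            apply List.drop_eq_nil_of_le; simp; omega
          have : pvCpl (tl.reverse.drop k) (pl.reverse.drop k) = 0 := by
            rw [hnil, pvCpl_nil_right]
          omega
  intro k; exact main (tl.length - k) k le_rfl

theorem pvCpl_le_left : ∀ (a b : List String), pvCpl a b ≤ a.length := by
  intro a
  induction a with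
  | nil => intro b; cases b <;> simp [pvCpl]
  | cons x xs ih =>
    intro b
    cases b with
    | nil => simp [pvCpl]
    | cons y ys =>
      simp only [pvCpl]
      split
      · simpa using ih ys
      · simp

-- ===== VERDICT (by name: the statement is the Claim_ definition above) =====
theorem get_bt_printed_lines_diff_spec : Claim_equal_get_bt_printed_lines_diff := by
  intro tl pl _
  have hA := pvALoop_eq pl.reverse tl.reverse 0
  simp only [Nat.cast_zero] at hA
  have hB := pvBCount_eq tl pl 0
  simp only [List.drop_zero, Nat.zero_add] at hB
  unfold Spec_get_bt_printed_lines_diff get_bt_printed_lines_diff get_bt_printed_lines_diff_alt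
  simp only [hA, hB]
  set k := pvCpl tl.reverse pl.reverse with hk
  have hkle : k ≤ tl.length := by
    have := pvCpl_le_left tl.reverse pl.reverse
    simpa using this
  by_cases h0 : k = 0
  · simp [h0]
  · have hcond : ((0 : Int) + (k : Int) > 0) := by
      have : 0 < k := Nat.pos_of_ne_zero h0
      omega
    rw [if_pos hcond, if_neg h0]
    simp only [List.reverse_cons]
    congr 1
    rw [List.reverse_drop, List.reverse_reverse, List.length_reverse]
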